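-- pv_equiv track=rewrite | github.com/k-harada/AtCoder | ARC/ARC134/A.py | solve
-- ===== SOURCE A (Python) =====
-- from bisect import bisect_right
--
-- def solve(n, l, w, a_list):
--     res = 0
--     x = 0
--     a_list.append(l)
--     while x < l:
--         # find next start
--         next_start = bisect_right(a_list, x)
--         # check if already done
--         if next_start > 0:
--             if a_list[next_start - 1] > x - w:
--                 x = a_list[next_start - 1] + w
--                 continue
--         d = (a_list[next_start] - x - 1) // w + 1
--         res += d
--         x += w * d
--
--     return res
-- ===== SOURCE B (Python) =====
-- # B: one linear pass over the barrier list maintaining a coverage frontier,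
-- # with the tiles for each gap counted in closed form -- no position loop, no
-- # bisect; A mutates a_list (appends l), B does not: the claimed equivalence is
-- # about the return value only.
-- def solve(n, l, w, a_list):
--     res = 0
--     e = 0  # everything in [0, e) is already handled
--     for a in a_list:
--         if e >= l:
--             return res
--         if a + w > e:
--             if a > e:
--                 res += -((e - a) // w)  # = ceil((a - e) / w) for w >= 1
--             e = a + w
--     if e < l:
--         res += -((e - l) // w)
--     return res
-- ===== Notes on version B (the rewrite author's own statement) =====
-- stated objective: simpler
-- what changed: B replaces A's while-loop over the position x (re-running bisect_right on the mutated list every iteration) by a single plain for-loop over the barrier list that maintains a coverage frontier and counts each gap's tiles with one closed-form ceiling division; B never searches and does not mutate a_list.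
-- outside the precondition, e.g. on solve(0, 1, 3, [1, 0, 1]): A returns 0, B returns 1; on solve(0, 5, -3, [9]): A returns -2, B returns -3
import Mathlib
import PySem

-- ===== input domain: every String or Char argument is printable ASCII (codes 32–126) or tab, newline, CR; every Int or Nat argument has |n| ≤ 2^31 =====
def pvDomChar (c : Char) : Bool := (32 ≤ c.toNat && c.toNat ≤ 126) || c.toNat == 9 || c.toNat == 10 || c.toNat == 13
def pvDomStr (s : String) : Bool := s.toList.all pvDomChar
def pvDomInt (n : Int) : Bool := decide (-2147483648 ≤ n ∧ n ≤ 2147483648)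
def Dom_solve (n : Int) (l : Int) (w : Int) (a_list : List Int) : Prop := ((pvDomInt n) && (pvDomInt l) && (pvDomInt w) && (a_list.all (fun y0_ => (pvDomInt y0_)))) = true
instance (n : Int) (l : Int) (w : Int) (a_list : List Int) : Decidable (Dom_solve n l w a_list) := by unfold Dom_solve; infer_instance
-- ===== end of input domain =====

-- B replaces A's while-loop over the position x (a bisect_right binary search per
-- iteration on the list A mutates by appending l) with one linear pass over the
-- barrier list that maintains a coverage frontier; A appends l to a_list in place,
-- B does not mutate — the equivalence claimed is about the return value only.

-- ===== PORT A =====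
-- bisect.bisect_right's binary-search loop (lo hi : Nat; Python's nonnegative //2
-- is exactly Nat division; every index read is in range here, so getD is exact).
def pvBisect (a : List Int) (x : Int) (lo hi : Nat) : Nat :=
  if h : lo < hi then
    let mid := (lo + hi) / 2
    if x < a.getD mid 0 then pvBisect a x lo mid
    else pvBisect a x (mid + 1) hi
  else lo
termination_by hi - lo
decreasing_by all_goals omega

-- A's while loop. Fuel l.toNat + 1 covers every terminating run of the Python loop:
-- whenever the Python loop terminates, x increases by at least 1 per iteration from 0,
-- so it performs at most l iterations. Indexing uses getD: inside Pre_solve every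
-- read is in range (Python would raise IndexError otherwise).
def solveGo (aL : List Int) (l w : Int) : Nat → Int → Int → Int
  | 0, _, res => res
  | fuel + 1, x, res =>
    if x < l then
      let ns := pvBisect aL x 0 aL.length
      if 0 < ns ∧ x - w < aL.getD (ns - 1) 0 then
        solveGo aL l w fuel (aL.getD (ns - 1) 0 + w) res
      else
        let d := PySem.Int.floordiv (aL.getD ns 0 - x - 1) w + 1
        solveGo aL l w fuel (x + w * d) (res + d)
    else res

def solve (n : Int) (l : Int) (w : Int) (a_list : List Int) : Int :=
  solveGo (a_list ++ [l]) l w (l.toNat + 1) 0 0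

-- ===== PORT B =====
-- B's single for-loop over the barrier list: e is the coverage frontier,
-- each gap's tile count is one closed-form ceiling division -((e-a)//w).
def altGo (l w : Int) : List Int → Int → Int → Int
  | [], e, res => if e < l then res + (-(PySem.Int.floordiv (e - l) w)) else res
  | a :: rest, e, res =>
    if l ≤ e then res
    else if e < a + w then
      if e < a then altGo l w rest (a + w) (res + (-(PySem.Int.floordiv (e - a) w)))
      else altGo l w rest (a + w) res
    else altGo l w rest e res

def solve_alt (n : Int) (l : Int) (w : Int) (a_list : List Int) : Int :=
  altGo l w a_list 0 0

-- ===== PRECONDITION & SPEC =====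
-- Pre_ excludes inputs with l > 0 on which w ≤ 0 (A raises ZeroDivisionError,
-- loops forever, or its value is an accident of negative-width floor division) or
-- a_list is unsorted (bisect_right's contract is violated and A's value, when its
-- loop happens to terminate, is an accident of binary search on unsorted data).
def Pre_solve (n : Int) (l : Int) (w : Int) (a_list : List Int) : Prop :=
  l ≤ 0 ∨ (1 ≤ w ∧ a_list.Pairwise (· ≤ ·))
instance (n : Int) (l : Int) (w : Int) (a_list : List Int) : Decidable (Pre_solve n l w a_list) := by
  unfold Pre_solve; infer_instance

def pvWitness_solve : Int × Int × Int × List Int := (4, 5, 2, [1, 3])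

def Spec_solve (n : Int) (l : Int) (w : Int) (a_list : List Int) (out : Int) : Prop := out = solve_alt n l w a_list
instance (n : Int) (l : Int) (w : Int) (a_list : List Int) (out : Int) : Decidable (Spec_solve n l w a_list out) := by unfold Spec_solve; infer_instance

-- ===== CLAIM (what is proved, stated in full; the proofs are below) =====
def Claim_equal_solve : Prop := ∀ (n : Int) (l : Int) (w : Int) (a_list : List Int), Dom_solve n l w a_list → Pre_solve n l w a_list → Spec_solve n l w a_list (solve n l w a_list)

-- ===== LEMMAS AND PROOFS =====

-- sortedness in index form
lemma sortedD_of_sorted (a : List Int) (h : a.Pairwise (· ≤ ·)) :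
    ∀ i j : Nat, i ≤ j → j < a.length → a.getD i 0 ≤ a.getD j 0 := by
  intro i j hij hj
  rcases Nat.eq_or_lt_of_le hij with rfl | hlt
  · exact le_rfl
  · rw [List.getD_eq_getElem _ _ (by omega), List.getD_eq_getElem _ _ hj]
    exact List.pairwise_iff_getElem.mp h i j (by omega) hj hlt

-- binary search on a list whose first m entries are sorted and whose entry m is > x
lemma pvBisect_sandwich (F : List Int) (x : Int) (m : Nat)
    (hs : ∀ i j : Nat, i ≤ j → j < m → F.getD i 0 ≤ F.getD j 0)
    (hl : x < F.getD m 0) :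
    ∀ lo hi, hi ≤ m + 1 → lo ≤ hi →
      (∀ j, j < lo → F.getD j 0 ≤ x) → (∀ j, hi ≤ j → j ≤ m → x < F.getD j 0) →
      (pvBisect F x lo hi ≤ m + 1 ∧
       (∀ j, j < pvBisect F x lo hi → F.getD j 0 ≤ x) ∧
       (∀ j, pvBisect F x lo hi ≤ j → j ≤ m → x < F.getD j 0)) := by
  intro lo hi
  induction hmeas : hi - lo using Nat.strong_induction_on generalizing lo hi with
  | _ k ih =>
    intro hhi hlohi hlow hhigh
    rw [pvBisect]
    by_cases hlt : lo < hi
    · rw [dif_pos hlt]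
      by_cases hmid : x < F.getD ((lo + hi) / 2) 0
      · rw [if_pos hmid]
        refine ih ((lo + hi) / 2 - lo) (by omega) lo ((lo + hi) / 2) rfl (by omega) (by omega)
          hlow ?_
        intro j hj hjm
        rcases Nat.lt_or_ge j m with hjm' | hjm'
        · exact lt_of_lt_of_le hmid (hs _ _ hj hjm')
        · have : j = m := by omega
          subst this; exact hl
      · rw [if_neg hmid]
        have hmidle : F.getD ((lo + hi) / 2) 0 ≤ x := le_of_not_gt hmid
        have hmidm : (lo + hi) / 2 < m := by
          by_contra hcon
          have : (lo + hi) / 2 = m := by omega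
          rw [this] at hmidle; omega
        refine ih (hi - ((lo + hi) / 2 + 1)) (by omega) ((lo + hi) / 2 + 1) hi rfl hhi
          (by omega) ?_ hhigh
        intro j hj
        rcases Nat.lt_or_ge j lo with hjlo | hjlo
        · exact hlow j hjlo
        · exact le_trans (hs j ((lo + hi) / 2) (by omega) hmidm) hmidle
    · rw [dif_neg hlt]
      have : lo = hi := by omega
      exact ⟨by omega, hlow, fun j hj hjm => hhigh j (by omega) hjm⟩

-- ceiling division two ways:  (k-1)//w + 1  =  -((-k)//w)  for w ≥ 1
lemma ceil_two_ways (k w : Int) (hw : 0 < w) :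
    PySem.Int.floordiv (k - 1) w + 1 = -(PySem.Int.floordiv (-k) w) := by
  have hq := (PySem.Int.floordiv_eq_iff_of_pos (a := k - 1) (b := w)
      (q := PySem.Int.floordiv (k - 1) w) hw).mp rfl
  have h2 : -(PySem.Int.floordiv (-k) w) = PySem.Int.floordiv (k - 1) w + 1 := by
    rw [PySem.Int.neg_floordiv_neg_eq_iff_of_pos hw]
    constructor
    · nlinarith [hq.1]
    · nlinarith [hq.2]
  omega

lemma getD_append_lt (a : List Int) (l : Int) (j : Nat) (hj : j < a.length) :
    (a ++ [l]).getD j 0 = a.getD j 0 := by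
  rw [List.getD_eq_getElem _ _ (by simp; omega), List.getD_eq_getElem _ _ hj,
    List.getElem_append_left hj]

lemma getD_append_self (a : List Int) (l : Int) :
    (a ++ [l]).getD a.length 0 = l := by
  rw [List.getD_eq_getElem _ _ (by simp)]
  simp

lemma drop_cons_getD (a : List Int) (i : Nat) (h : i < a.length) :
    a.drop i = a.getD i 0 :: a.drop (i + 1) := by
  rw [List.getD_eq_getElem _ _ h]
  exact List.drop_eq_getElem_cons h

-- past the end of the segment both loops return res unchanged
lemma altGo_ge (l w : Int) (suf : List Int) (e res : Int) (h : l ≤ e) :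
    altGo l w suf e res = res := by
  cases suf with
  | nil => simp only [altGo]; rw [if_neg (by omega)]
  | cons a rest => simp [altGo, h]

lemma solveGo_ge (aL : List Int) (l w : Int) (fuel : Nat) (x res : Int) (h : l ≤ x) :
    solveGo aL l w fuel x res = res := by
  cases fuel with
  | zero => rfl
  | succ fuel => simp only [solveGo]; rw [if_neg (by omega)]

-- B absorbs a run of barriers ≤ x without counting tiles: the frontier ends at
-- max x (last barrier + w)
lemma altGo_absorb (a : List Int) (l w : Int) (hw : 1 ≤ w)
    (hs : ∀ i j : Nat, i ≤ j → j < a.length → a.getD i 0 ≤ a.getD j 0) :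
    ∀ k i x, i < k → k ≤ a.length → (∀ j, i ≤ j → j < k → a.getD j 0 ≤ x) → x < l →
      ∀ res, altGo l w (a.drop i) x res
        = altGo l w (a.drop k) (max x (a.getD (k - 1) 0 + w)) res := by
  intro k i x
  induction hmeas : k - i using Nat.strong_induction_on generalizing i x with
  | _ t ih =>
    intro hik hk hle hxl res
    rw [drop_cons_getD a i (by omega)]
    simp only [altGo]
    rw [if_neg (by omega)]
    have hax : a.getD i 0 ≤ x := hle i le_rfl hik
    by_cases hcase : x < a.getD i 0 + w
    · rw [if_pos hcase, if_neg (by omega)]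
      by_cases hlast : i + 1 = k
      · have hk1 : k - 1 = i := by omega
        have hm : max x (a.getD (k - 1) 0 + w) = a.getD i 0 + w := by
          rw [hk1]; omega
        rw [hlast, hm]
      · have hsk : a.getD i 0 + w ≤ a.getD (k - 1) 0 + w := by
          have := hs i (k - 1) (by omega) (by omega); omega
        by_cases hlt : a.getD i 0 + w < l
        · have hrec := ih (k - (i + 1)) (by omega) (i + 1) (a.getD i 0 + w) rfl
            (by omega) hk (by intro j hj1 hj2; have := hle j (by omega) hj2; omega) hlt res
          rw [hrec]
          have hm1 : max (a.getD i 0 + w) (a.getD (k - 1) 0 + w) = a.getD (k - 1) 0 + w := by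
            omega
          have hm2 : max x (a.getD (k - 1) 0 + w) = a.getD (k - 1) 0 + w := by omega
          rw [hm1, hm2]
        · rw [altGo_ge _ _ _ _ _ (by omega), altGo_ge _ _ _ _ _ (by omega)]
    · rw [if_neg hcase]
      by_cases hlast : i + 1 = k
      · have hk1 : k - 1 = i := by omega
        have hm : max x (a.getD (k - 1) 0 + w) = x := by rw [hk1]; omega
        rw [hlast, hm]
      · exact ih (k - (i + 1)) (by omega) (i + 1) x rfl (by omega) hk
          (by intro j hj1 hj2; exact hle j (by omega) hj2) hxl res

-- main simulation: A's position loop = B's list pass, invariant: all barriers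
-- before index i have coverage fully behind x
lemma main_sim (a : List Int) (l w : Int) (hw : 1 ≤ w)
    (hs : ∀ i j : Nat, i ≤ j → j < a.length → a.getD i 0 ≤ a.getD j 0) :
    ∀ (fuel : Nat) (x res : Int) (i : Nat), i ≤ a.length →
      (∀ j, j < i → a.getD j 0 + w ≤ x) → l < x + (fuel : Int) →
      solveGo (a ++ [l]) l w fuel x res = altGo l w (a.drop i) x res := by
  intro fuel
  induction fuel with
  | zero =>
    intro x res i _ _ hfuel
    rw [solveGo_ge _ _ _ _ _ _ (by push_cast at hfuel; omega),
      altGo_ge _ _ _ _ _ (by push_cast at hfuel; omega)]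
  | succ fuel ih =>
    intro x res i hi hpre hfuel
    by_cases hx : x < l
    · simp only [solveGo]
      rw [if_pos hx]
      have hsF : ∀ i' j : Nat, i' ≤ j → j < a.length → (a ++ [l]).getD i' 0 ≤ (a ++ [l]).getD j 0 := by
        intro i' j hij hj
        rw [getD_append_lt a l i' (by omega), getD_append_lt a l j hj]
        exact hs i' j hij hj
      have hlF : x < (a ++ [l]).getD a.length 0 := by rw [getD_append_self]; exact hx
      obtain ⟨b0, b1, b2⟩ := pvBisect_sandwich (a ++ [l]) x a.length hsF hlF 0
        (a.length + 1) (by simp) (by omega) (by omega) (by omega)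
      have hlen : (a ++ [l]).length = a.length + 1 := by simp
      rw [hlen]
      set ns := pvBisect (a ++ [l]) x 0 (a.length + 1) with hns
      have hnsm : ns ≤ a.length := by
        by_contra hcon
        have := b1 a.length (by omega)
        rw [getD_append_self] at this
        omega
      have hins : i ≤ ns := by
        by_contra hcon
        have h1 := hpre ns (by omega)
        have h2 := b2 ns le_rfl (by omega)
        rw [getD_append_lt a l ns (by omega)] at h2
        omega
      have hble : ∀ j, i ≤ j → j < ns → a.getD j 0 ≤ x := by
        intro j _ hj2
        have := b1 j hj2
        rwa [getD_append_lt a l j (by omega)] at this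
      by_cases hbr : 0 < ns ∧ x - w < (a ++ [l]).getD (ns - 1) 0
      · -- continue branch: jump past the last barrier ≤ x
        rw [if_pos hbr]
        have hcc : (a ++ [l]).getD (ns - 1) 0 = a.getD (ns - 1) 0 :=
          getD_append_lt a l (ns - 1) (by omega)
        have hins1 : i < ns := by
          by_contra hcon
          have := hpre (ns - 1) (by omega)
          rw [hcc] at hbr
          omega
        have hxx' : x < (a ++ [l]).getD (ns - 1) 0 + w := by omega
        rw [ih ((a ++ [l]).getD (ns - 1) 0 + w) res ns hnsm ?_ (by push_cast at hfuel ⊢; omega)]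
        · rw [altGo_absorb a l w hw hs ns i x hins1 hnsm hble hx res]
          have hm : max x (a.getD (ns - 1) 0 + w) = (a ++ [l]).getD (ns - 1) 0 + w := by
            rw [hcc]; omega
          rw [hm]
        · intro j hj
          have h1 : a.getD j 0 ≤ a.getD (ns - 1) 0 := hs j (ns - 1) (by omega) (by omega)
          rw [hcc]
          omega
      · -- place branch: d tiles to the next barrier / l
        rw [if_neg hbr]
        have hxnxt : x < (a ++ [l]).getD ns 0 := b2 ns le_rfl (by omega)
        have hdq := (PySem.Int.floordiv_eq_iff_of_pos (a := (a ++ [l]).getD ns 0 - x - 1)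
          (b := w) (q := PySem.Int.floordiv ((a ++ [l]).getD ns 0 - x - 1) w) (by omega)).mp rfl
        have hd1 : 1 ≤ PySem.Int.floordiv ((a ++ [l]).getD ns 0 - x - 1) w + 1 := by
          nlinarith [hdq.1, hdq.2]
        have hwd : w ≤ w * (PySem.Int.floordiv ((a ++ [l]).getD ns 0 - x - 1) w + 1) := by
          nlinarith [hd1]
        have hx'lb : (a ++ [l]).getD ns 0 ≤
            x + w * (PySem.Int.floordiv ((a ++ [l]).getD ns 0 - x - 1) w + 1) := by
          nlinarith [hdq.2]
        have hx'ub : x + w * (PySem.Int.floordiv ((a ++ [l]).getD ns 0 - x - 1) w + 1) <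
            (a ++ [l]).getD ns 0 + w := by
          nlinarith [hdq.1]
        have hBside : altGo l w (a.drop i) x res = altGo l w (a.drop ns) x res := by
          rcases Nat.eq_or_lt_of_le hins with he | hlt
          · rw [he]
          · rw [altGo_absorb a l w hw hs ns i x hlt hnsm hble hx res]
            have h0 : a.getD (ns - 1) 0 + w ≤ x := by
              have hc : ¬ (x - w < (a ++ [l]).getD (ns - 1) 0) := fun hc => hbr ⟨by omega, hc⟩
              rw [← getD_append_lt a l (ns - 1) (by omega)]
              omega
            have hm : max x (a.getD (ns - 1) 0 + w) = x := by omega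
            rw [hm]
        rw [hBside]
        rcases Nat.eq_or_lt_of_le hnsm with hem | hlm
        · -- ns = a.length: the next stop is the appended l itself
          have hnl : (a ++ [l]).getD ns 0 = l := by rw [hem, getD_append_self]
          rw [solveGo_ge _ _ _ _ _ _ (by omega)]
          rw [hem, List.drop_length]
          simp only [altGo]
          rw [if_pos hx]
          have hc := ceil_two_ways (l - x) w (by omega)
          have hxl : -(l - x) = x - l := by ring
          rw [hxl] at hc
          rw [getD_append_self]
          omega
        · -- ns < a.length: the next stop is barrier ns
          have hna : (a ++ [l]).getD ns 0 = a.getD ns 0 := getD_append_lt a l ns hlm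
          rw [ih (x + w * (PySem.Int.floordiv ((a ++ [l]).getD ns 0 - x - 1) w + 1))
            (res + (PySem.Int.floordiv ((a ++ [l]).getD ns 0 - x - 1) w + 1)) ns hnsm ?_
            (by push_cast at hfuel ⊢; omega)]
          · rw [drop_cons_getD a ns hlm]
            simp only [altGo]
            have hc := ceil_two_ways ((a ++ [l]).getD ns 0 - x) w (by omega)
            have hneg : -((a ++ [l]).getD ns 0 - x) = x - a.getD ns 0 := by rw [hna]; ring
            rw [hneg] at hc
            rw [if_neg (show ¬ l ≤ x by omega), if_pos (show x < a.getD ns 0 + w by omega),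
              if_pos (show x < a.getD ns 0 by omega)]
            have hres : res + -(PySem.Int.floordiv (x - a.getD ns 0) w)
                = res + (PySem.Int.floordiv ((a ++ [l]).getD ns 0 - x - 1) w + 1) := by
              omega
            rw [hres]
            by_cases hxl' : l ≤ x + w * (PySem.Int.floordiv ((a ++ [l]).getD ns 0 - x - 1) w + 1)
            · rw [if_pos hxl', altGo_ge _ _ _ _ _ (by omega)]
            · rw [if_neg hxl', if_pos (show _ < a.getD ns 0 + w by rw [← hna]; omega),
                if_neg (show ¬ _ < a.getD ns 0 by rw [← hna]; omega)]
          · intro j hj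
            have h1 : a.getD j 0 + w ≤ x := by
              have hc : ¬ (x - w < (a ++ [l]).getD (ns - 1) 0) := fun hc => hbr ⟨by omega, hc⟩
              rw [getD_append_lt a l (ns - 1) (by omega)] at hc
              have := hs j (ns - 1) (by omega) (by omega)
              omega
            omega
    · simp only [solveGo]
      rw [if_neg hx, altGo_ge _ _ _ _ _ (by omega)]

-- ===== VERDICT (by name: the statement is the Claim_ definition above) =====
theorem solve_spec : Claim_equal_solve := by
  intro n l w a_list _ hpre
  unfold Spec_solve solve solve_alt
  rcases hpre with hl | ⟨hw, hsort⟩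
  · rw [solveGo_ge _ l w _ 0 0 (by omega), altGo_ge l w a_list 0 0 (by omega)]
  · have := main_sim a_list l w hw (sortedD_of_sorted a_list hsort) (l.toNat + 1) 0 0 0
      (by omega) (by intro j hj; omega) (by push_cast; omega)
    simpa using this
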